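-- pv_equiv track=rewrite | github.com/tachyon83/code-rhino | DAY73-BOJ1398-동전 문제/sinholee.py | get_coin_cnt
-- ===== SOURCE A (Python) =====
-- def get_coin_cnt(num):
--     cnt = 0
--     # 1 10의 0승 2승 4승 ....2n승
--     for exp in range(16, 0, -2):
--         min_exp, max_exp = exp-2, exp
--         target_num = num // (10 ** min_exp)
--         num = num % (10 ** min_exp)
--         if target_num:
--             dp =[99 for i in range(target_num+1)]
--             dp[0] =0
--             coins = [1, 10, 25]
--             for j in range(1, target_num+1):
--                 for coin in coins:
--                     if coin<=j:
--                         dp[j] = min(dp[j], dp[j-coin]+1)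
--             cnt += dp[target_num]
--     return cnt
-- ===== SOURCE B (Python) =====
-- def get_coin_cnt(num):
--     cnt = 0
--     while num > 0:
--         num, v = divmod(num, 100)
--         cnt += min(q + (v - 25 * q) // 10 + (v - 25 * q) % 10 for q in range(v // 25 + 1))
--     return cnt
-- ===== Notes on version B (the rewrite author's own statement) =====
-- stated objective: simpler
-- what changed: Replaces the fixed eight-iteration base-hundred chunking with per-chunk coin DP tables by a while/divmod loop over base-hundred digits whose chunk cost is computed in closed form (minimize quarters q plus dimes and pennies of the remainder), removing the DP array entirely.
import Mathlib
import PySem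

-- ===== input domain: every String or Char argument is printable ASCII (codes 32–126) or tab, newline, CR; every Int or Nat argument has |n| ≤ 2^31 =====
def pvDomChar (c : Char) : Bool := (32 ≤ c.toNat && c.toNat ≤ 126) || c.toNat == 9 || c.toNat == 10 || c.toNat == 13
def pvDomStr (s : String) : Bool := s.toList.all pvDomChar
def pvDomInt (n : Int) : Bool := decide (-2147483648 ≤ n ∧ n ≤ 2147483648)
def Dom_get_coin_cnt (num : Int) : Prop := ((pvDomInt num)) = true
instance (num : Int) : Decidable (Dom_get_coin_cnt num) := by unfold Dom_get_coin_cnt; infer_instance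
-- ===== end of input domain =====

-- ===== PORT A =====
-- B replaces the per-chunk coin DP by a closed-form minimum over the 25-coin count (objective: simpler).

-- inner DP block of A over one chunk value t (dp table, coins [1,10,25]); indices are in range for t ≥ 0 (Pre_)
def aChunk (t : Int) : Int :=
  let dp : List Int := (List.range (t + 1).toNat).map (fun _ => (99 : Int))  -- [99 for i in range(t+1)]
  let dp := PySem.List.pySetD dp 0 0                                         -- dp[0] = 0
  let coins : List Int := [1, 10, 25]
  let dp := (PySem.List.pyRange 1 (t + 1) 1).foldl (fun dp j =>
    coins.foldl (fun dp coin =>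
      if coin ≤ j then
        PySem.List.pySetD dp j (min (PySem.List.pyGetD dp j 0) (PySem.List.pyGetD dp (j - coin) 0 + 1))
      else dp) dp) dp
  PySem.List.pyGetD dp t 0                                                   -- dp[target_num]

-- one iteration of A's `for exp in range(16, 0, -2)` body; exp - 2 ≥ 0 on every value the range yields
def aStep (st : Int × Int) (exp : Int) : Int × Int :=
  let target_num := PySem.Int.floordiv st.1 ((10 : Int) ^ (exp - 2).toNat)
  let num' := PySem.Int.mod st.1 ((10 : Int) ^ (exp - 2).toNat)
  if target_num ≠ 0 then (num', st.2 + aChunk target_num) else (num', st.2)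

def get_coin_cnt (num : Int) : Int :=
  ((PySem.List.pyRange 16 0 (-2)).foldl aStep (num, 0)).2

-- ===== PORT B =====
-- min(q + (v-25q)//10 + (v-25q)%10 for q in range(v//25 + 1)); the range is nonempty for v ≥ 0, getD 0 unreachable there
def chunkMin (v : Int) : Int :=
  (PySem.List.min?
    ((PySem.List.pyRange 0 (PySem.Int.floordiv v 25 + 1) 1).map
      (fun q => q + PySem.Int.floordiv (v - 25 * q) 10 + PySem.Int.mod (v - 25 * q) 10))
    (fun x => x)).getD 0

-- the `while num > 0` loop of B with accumulator cnt
def bLoop (num cnt : Int) : Int :=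
  if num > 0 then
    bLoop (PySem.Int.floordiv num 100) (cnt + chunkMin (PySem.Int.mod num 100))
  else cnt
termination_by num.toNat
decreasing_by
  rw [PySem.Int.floordiv_eq_ediv_of_pos (by norm_num : (0:Int) < 100)]
  omega

def get_coin_cnt_alt (num : Int) : Int := bLoop num 0

-- ===== PRECONDITION & SPEC =====
-- A raises IndexError on negative num (the dp list built from range(target_num+1) is empty and its first-element assignment fails), so Pre_ requires a nonnegative num.
def Pre_get_coin_cnt (num : Int) : Prop := 0 ≤ num
instance (num : Int) : Decidable (Pre_get_coin_cnt num) := by unfold Pre_get_coin_cnt; infer_instance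
def pvWitness_get_coin_cnt : Int := 2359

def Spec_get_coin_cnt (num : Int) (out : Int) : Prop := out = get_coin_cnt_alt num
instance (num : Int) (out : Int) : Decidable (Spec_get_coin_cnt num out) := by unfold Spec_get_coin_cnt; infer_instance

-- ===== CLAIM (what is proved, stated in full; the proofs are below) =====
def Claim_equal_get_coin_cnt : Prop := ∀ (num : Int), Dom_get_coin_cnt num → Pre_get_coin_cnt num → Spec_get_coin_cnt num (get_coin_cnt num)

-- ===== LEMMAS AND PROOFS =====

-- the contribution of one chunk in A (0 when the `if target_num:` guard skips)
def gA (t : Int) : Int := if t ≠ 0 then aChunk t else 0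

-- pointwise: A's DP chunk cost equals B's closed-form chunk cost on 0 ≤ t < 100
set_option maxRecDepth 40000 in
set_option maxHeartbeats 4000000 in
theorem chunk_eq (t : Int) (h0 : 0 ≤ t) (h1 : t < 100) : gA t = chunkMin t := by
  have H : ∀ t ∈ PySem.List.pyRange 0 100 1, gA t = chunkMin t := by decide
  exact H t (PySem.List.mem_pyRange_one.mpr ⟨h0, h1⟩)

theorem aStep_eval (n c e : Int) :
    aStep (n, c) e = (n % (10 : Int) ^ (e - 2).toNat, c + gA (n / (10 : Int) ^ (e - 2).toNat)) := by
  have hp : (0 : Int) < (10 : Int) ^ (e - 2).toNat := by positivity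
  simp only [aStep, PySem.Int.floordiv_eq_ediv_of_pos hp, PySem.Int.mod_eq_emod_of_pos hp, gA]
  split <;> simp

theorem aStep_zero (n c e : Int) (h0 : 0 ≤ n) (hlt : n < (10 : Int) ^ (e - 2).toNat) :
    aStep (n, c) e = (n, c) := by
  rw [aStep_eval n c e, Int.ediv_eq_zero_of_lt h0 hlt, Int.emod_eq_of_lt h0 hlt]
  simp [gA]

-- the recursion equation of bLoop with Python's // and % rewritten to Int./ and Int.%
theorem bLoop_eq (n c : Int) :
    bLoop n c = if n > 0 then bLoop (n / 100) (c + chunkMin (n % 100)) else c := by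
  conv_lhs => rw [bLoop]
  by_cases h : n > 0
  · rw [if_pos h, if_pos h, PySem.Int.floordiv_eq_ediv_of_pos (by norm_num : (0:Int) < 100),
      PySem.Int.mod_eq_emod_of_pos (by norm_num : (0:Int) < 100)]
  · rw [if_neg h, if_neg h]

theorem bLoop_acc (k : Nat) : ∀ (n c : Int), n.toNat ≤ k → bLoop n c = c + bLoop n 0 := by
  induction k with
  | zero =>
    intro n c h
    have hn : ¬ n > 0 := by omega
    rw [bLoop_eq n c, bLoop_eq n 0, if_neg hn, if_neg hn]; ring
  | succ k ih =>
    intro n c h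
    rw [bLoop_eq n c, bLoop_eq n 0]
    by_cases hp : n > 0
    · rw [if_pos hp, if_pos hp]
      have hlt : (n / 100).toNat ≤ k := by omega
      rw [ih _ _ hlt, ih (n / 100) (0 + chunkMin (n % 100)) hlt]; ring
    · rw [if_neg hp, if_neg hp]; ring

theorem chunkMin_zero : chunkMin 0 = 0 := by decide

theorem bLoop_step (n : Int) (h0 : 0 ≤ n) :
    bLoop n 0 = chunkMin (n % 100) + bLoop (n / 100) 0 := by
  rw [bLoop_eq n 0]
  by_cases h : n > 0
  · rw [if_pos h, bLoop_acc (n / 100).toNat _ _ le_rfl]; ring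
  · have hn : n = 0 := by omega
    subst hn
    rw [if_neg h, show (0:Int) % 100 = 0 from by norm_num, chunkMin_zero,
        show (0:Int) / 100 = 0 from by norm_num, bLoop_eq]
    norm_num

-- ===== VERDICT (by name: the statement is the Claim_ definition above) =====
theorem get_coin_cnt_spec : Claim_equal_get_coin_cnt := by
  intro num hdom hpre
  unfold Spec_get_coin_cnt
  have hub : num ≤ 2147483648 := by
    unfold Dom_get_coin_cnt pvDomInt at hdom
    simpa using (of_decide_eq_true hdom).2
  have h0 : (0:Int) ≤ num := hpre
  -- evaluate A: the 8 fixed steps of the exp-range fold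
  have hr : PySem.List.pyRange 16 0 (-2) = [16,14,12,10,8,6,4,2] := by decide
  have hA : get_coin_cnt num =
      gA (num / 100000000) + gA (num % 100000000 / 1000000) + gA (num % 1000000 / 10000)
        + gA (num % 10000 / 100) + gA (num % 100) := by
    unfold get_coin_cnt
    rw [hr]
    simp only [List.foldl_cons, List.foldl_nil]
    rw [aStep_zero num 0 16 h0
          (by rw [show ((16:Int)-2).toNat = 14 from by omega]; norm_num; omega),
        aStep_zero num 0 14 h0
          (by rw [show ((14:Int)-2).toNat = 12 from by omega]; norm_num; omega),
        aStep_zero num 0 12 h0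
          (by rw [show ((12:Int)-2).toNat = 10 from by omega]; norm_num; omega),
        aStep_eval num 0 10, aStep_eval _ _ 8, aStep_eval _ _ 6,
        aStep_eval _ _ 4, aStep_eval _ _ 2]
    simp only [show ((10:Int)-2).toNat = 8 from by omega, show ((8:Int)-2).toNat = 6 from by omega,
      show ((6:Int)-2).toNat = 4 from by omega, show ((4:Int)-2).toNat = 2 from by omega,
      show ((2:Int)-2).toNat = 0 from by omega]
    norm_num
  -- evaluate B: five while-iterations, after which the remaining number is 0
  have hB : get_coin_cnt_alt num =
      chunkMin (num % 100) + chunkMin (num / 100 % 100) + chunkMin (num / 10000 % 100)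
        + chunkMin (num / 1000000 % 100) + chunkMin (num / 100000000 % 100) := by
    unfold get_coin_cnt_alt
    rw [bLoop_step num h0,
        bLoop_step (num / 100) (by omega),
        bLoop_step (num / 100 / 100) (by omega),
        bLoop_step (num / 100 / 100 / 100) (by omega),
        bLoop_step (num / 100 / 100 / 100 / 100) (by omega),
        show num / 100 / 100 / 100 / 100 / 100 = 0 from by omega,
        show bLoop 0 0 = 0 from by rw [bLoop_eq, if_neg (by norm_num)]]
    rw [show num / 100 / 100 = num / 10000 from by omega]
    rw [show num / 10000 / 100 = num / 1000000 from by omega]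
    rw [show num / 1000000 / 100 = num / 100000000 from by omega]
    ring
  rw [hA, hB]
  -- align A's top-down chunks with B's bottom-up base-100 digits
  rw [show num % 100000000 / 1000000 = num / 1000000 % 100 from by omega,
      show num % 1000000 / 10000 = num / 10000 % 100 from by omega,
      show num % 10000 / 100 = num / 100 % 100 from by omega,
      show num / 100000000 % 100 = num / 100000000 from by omega]
  rw [chunk_eq (num / 100000000) (by omega) (by omega),
      chunk_eq (num / 1000000 % 100) (by omega) (by omega),
      chunk_eq (num / 10000 % 100) (by omega) (by omega),
      chunk_eq (num / 100 % 100) (by omega) (by omega),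
      chunk_eq (num % 100) (by omega) (by omega)]
  ring
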